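-- pv_equiv track=rewrite | github.com/Xprriacst/Windsurf-Airhost-0207 | utils/content_analyzer.py | _check_imports_at_top
-- ===== SOURCE A (Python) =====
-- def _check_imports_at_top(content):
--     """Check if imports are at the top of Python file."""
--     lines = content.split('\n')
--     code_started = False
--
--     for line in lines:
--         stripped = line.strip()
--         if not stripped or stripped.startswith('#'):
--             continue
--
--         if stripped.startswith(('import ', 'from ')):
--             if code_started:
--                 return False
--         else:
--             code_started = True
--
--     return True
-- ===== SOURCE B (Python) =====
-- def _check_imports_at_top(content):
--     """Check if imports are at the top of Python file."""
--     sig = [s for s in (line.strip() for line in content.split('\n'))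
--            if s and not s.startswith('#')]
--     imp = [i for i, s in enumerate(sig) if s.startswith(('import ', 'from '))]
--     oth = [i for i, s in enumerate(sig) if not s.startswith(('import ', 'from '))]
--     if not imp or not oth:
--         return True
--     return max(imp) < min(oth)
-- ===== Notes on version B (the rewrite author's own statement) =====
-- stated objective: simpler
-- what changed: Replaces the stateful code_started flag and early return with a flag-free extremal-index comparison: collect the positions of import lines and of other significant lines and compare max(import positions) < min(other positions).
import Mathlib
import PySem

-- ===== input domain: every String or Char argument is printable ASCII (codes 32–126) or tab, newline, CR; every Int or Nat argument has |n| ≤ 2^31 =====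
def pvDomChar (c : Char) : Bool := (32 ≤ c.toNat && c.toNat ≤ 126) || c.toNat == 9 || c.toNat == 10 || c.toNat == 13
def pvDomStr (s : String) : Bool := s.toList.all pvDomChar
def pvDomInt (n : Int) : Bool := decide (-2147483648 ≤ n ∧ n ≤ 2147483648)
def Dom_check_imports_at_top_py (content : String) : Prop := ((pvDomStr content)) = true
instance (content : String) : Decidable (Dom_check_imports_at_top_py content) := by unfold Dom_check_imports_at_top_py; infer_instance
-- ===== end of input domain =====

-- B replaces A's stateful code_started flag by a flag-free extremal-index comparison
-- (max import position < min non-import position over the significant lines): objective 'simpler'.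


-- ===== PORT A =====
-- the for-loop over lines with the code_started flag and the early 'return False'
def pvGoA : List String → Bool → Bool
  | [], _ => true
  | line :: rest, codeStarted =>
    let stripped := PySem.Str.strip line
    if stripped == "" || PySem.Str.startswith stripped "#" then
      pvGoA rest codeStarted
    else if PySem.Str.startswith stripped "import " || PySem.Str.startswith stripped "from " then
      if codeStarted then false else pvGoA rest codeStarted
    else
      pvGoA rest true

def check_imports_at_top_py (content : String) : Bool :=
  -- content.split('\n'): the separator is the literal "\n" ≠ "", so split? is always some
  pvGoA ((PySem.Str.split? content "\n").getD []) false

-- ===== PORT B =====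
def pvIsImport (s : String) : Bool :=
  PySem.Str.startswith s "import " || PySem.Str.startswith s "from "

def pvSignificant (s : String) : Bool :=
  !(s == "" || PySem.Str.startswith s "#")

def pvSigLines (content : String) : List String :=
  -- content.split('\n'): the separator is the literal "\n" ≠ "", so split? is always some
  (((PySem.Str.split? content "\n").getD []).map PySem.Str.strip).filter pvSignificant

def check_imports_at_top_py_alt (content : String) : Bool :=
  let sig := pvSigLines content
  let imp := ((PySem.List.enumerate sig 0).filter (fun p => pvIsImport p.2)).map (fun p => p.1)
  let oth := ((PySem.List.enumerate sig 0).filter (fun p => !pvIsImport p.2)).map (fun p => p.1)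
  -- 'not imp or not oth or max(imp) < min(oth)': max?/min? are none exactly on the empty list
  match PySem.List.max? imp (fun x => x), PySem.List.min? oth (fun x => x) with
  | some M, some m => decide (M < m)
  | _, _ => true

-- ===== PRECONDITION & SPEC =====
def Spec_check_imports_at_top_py (content : String) (out : Bool) : Prop := out = check_imports_at_top_py_alt content
instance (content : String) (out : Bool) : Decidable (Spec_check_imports_at_top_py content out) := by unfold Spec_check_imports_at_top_py; infer_instance

-- ===== CLAIM (what is proved, stated in full; the proofs are below) =====
def Claim_equal_check_imports_at_top_py : Prop := ∀ (content : String), Dom_check_imports_at_top_py content → Spec_check_imports_at_top_py content (check_imports_at_top_py content)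

-- ===== LEMMAS AND PROOFS =====

-- A's loop restricted to the significant (already stripped) lines
def pvGoS : List String → Bool → Bool
  | [], _ => true
  | s :: r, started =>
    if pvIsImport s then (if started then false else pvGoS r started)
    else pvGoS r true

lemma pvGoA_eq_goS (ls : List String) (b : Bool) :
    pvGoA ls b = pvGoS ((ls.map PySem.Str.strip).filter pvSignificant) b := by
  induction ls generalizing b with
  | nil => rfl
  | cons l rest ih =>
    by_cases h1 : PySem.Str.strip l = ""
    · simp [pvGoA, pvSignificant, h1, ih]
    · by_cases h2 : PySem.Str.startswith (PySem.Str.strip l) "#" = true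
      all_goals simp at h2
      · simp [pvGoA, pvSignificant, h2, ih]
      · by_cases himp : (PySem.Str.startswith (PySem.Str.strip l) "import " ||
            PySem.Str.startswith (PySem.Str.strip l) "from ") = true
        all_goals simp at himp
        · cases b <;>
            simp [pvGoA, pvGoS, pvSignificant, pvIsImport, h1, h2, himp, ih]
        · cases b <;>
            simp [pvGoA, pvGoS, pvSignificant, pvIsImport, h1, h2, himp, ih]

lemma pvGoS_true (r : List String) :
    pvGoS r true = r.all (fun s => !pvIsImport s) := by
  induction r with
  | nil => rfl
  | cons s t ih =>
    by_cases h : pvIsImport s <;> simp [pvGoS, h, ih]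

lemma pvGoS_false (r : List String) :
    pvGoS r false = (r.dropWhile pvIsImport).all (fun s => !pvIsImport s) := by
  induction r with
  | nil => rfl
  | cons s t ih =>
    by_cases h : pvIsImport s
    · simpa [pvGoS, h, List.dropWhile_cons] using ih
    · simp [pvGoS, h, pvGoS_true]

-- the index lists of B, with a general start index
def pvIdxs (p : String → Bool) (t : List String) (k : Int) : List Int :=
  ((PySem.List.enumerate t k).filter (fun q => p q.2)).map (fun q => q.1)

lemma pvIdxs_cons (p : String → Bool) (x : String) (r : List String) (k : Int) :
    pvIdxs p (x :: r) k = (if p x then [k] else []) ++ pvIdxs p r (k + 1) := by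
  by_cases h : p x <;> simp [pvIdxs, PySem.List.enumerate_cons, h]

lemma pvIdxs_lb (p : String → Bool) (t : List String) (k : Int) :
    ∀ j ∈ pvIdxs p t k, k ≤ j := by
  intro j hj
  simp only [pvIdxs, List.mem_map, List.mem_filter] at hj
  obtain ⟨q, ⟨hq, _⟩, rfl⟩ := hj
  obtain ⟨m, hm, rfl⟩ := (PySem.List.mem_enumerate_iff _ _ _).1 hq
  omega

lemma pvIdxs_nil_iff (p : String → Bool) (t : List String) (k : Int) :
    pvIdxs p t k = [] ↔ t.all (fun x => !p x) = true := by
  induction t generalizing k with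
  | nil => simp [pvIdxs]
  | cons x r ih =>
    by_cases h : p x <;> simp [pvIdxs_cons, h, ih (k + 1)]

lemma pvFoldlMin_eq (a : Int) (l : List Int) (h : ∀ y ∈ l, a ≤ y) :
    l.foldl min a = a := by
  have h1 := PySem.List.foldl_min_le l a
  rcases PySem.List.foldl_min_mem l a with hm | hm
  · exact hm
  · exact le_antisymm h1.1 (h _ hm)

-- B's extremal-index comparison with a general start index
def pvF (t : List String) (k : Int) : Bool :=
  match PySem.List.max? (pvIdxs pvIsImport t k) (fun x => x),
        PySem.List.min? (pvIdxs (fun s => !pvIsImport s) t k) (fun x => x) with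
  | some M, some m => decide (M < m)
  | _, _ => true

lemma pvMax?_nil : PySem.List.max? ([] : List Int) (fun x => x) = none := by
  simp [PySem.List.max?_eq_none_iff]

lemma pvMin?_nil : PySem.List.min? ([] : List Int) (fun x => x) = none := by
  simp [PySem.List.min?_eq_none_iff]

lemma pvF_eq (t : List String) (k : Int) :
    pvF t k = (t.dropWhile pvIsImport).all (fun s => !pvIsImport s) := by
  induction t generalizing k with
  | nil => rfl
  | cons x r ih =>
    by_cases h : pvIsImport x
    · -- import line: the import-index list gains k in front, dropWhile skips x
      rw [List.dropWhile_cons, if_pos h, ← ih (k + 1)]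
      unfold pvF
      rw [pvIdxs_cons, pvIdxs_cons]
      simp only [h, Bool.not_true, if_true, if_false, Bool.false_eq_true,
        List.cons_append, List.nil_append]
      rcases hO : pvIdxs (fun s => !pvIsImport s) r (k + 1) with _ | ⟨o, O'⟩
      · rcases hJ : pvIdxs pvIsImport r (k + 1) with _ | ⟨j, J'⟩ <;>
          simp [pvMin?_nil, pvMax?_nil, PySem.List.max?_id_cons]
      · have hmO : ∀ y ∈ (o :: O'), k + 1 ≤ y := by
          intro y hy
          apply pvIdxs_lb (fun s => !pvIsImport s) r (k + 1)
          rw [hO]; exact hy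
        rcases hJ : pvIdxs pvIsImport r (k + 1) with _ | ⟨j, J'⟩
        · have hm : (O'.foldl min o) ∈ o :: O' := by
            rcases PySem.List.foldl_min_mem O' o with h' | h' <;> simp [h']
          have hk : k + 1 ≤ O'.foldl min o := hmO _ hm
          simp only [PySem.List.max?_id_cons, PySem.List.min?_id_cons, pvMax?_nil,
            List.foldl_nil]
          simp only [decide_eq_true_eq]
          omega
        · have hj : k + 1 ≤ j := by
            apply pvIdxs_lb pvIsImport r (k + 1); simp [hJ]
          have hmx : List.foldl max k (j :: J') = List.foldl max j J' := by
            simp only [List.foldl_cons]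
            congr 1; omega
          simp [PySem.List.max?_id_cons, PySem.List.min?_id_cons, hmx]
    · -- non-import line: x heads the other-index list, dropWhile stops at x
      rw [List.dropWhile_cons, if_neg h]
      have hb : pvIsImport x = false := by simpa using h
      rw [List.all_cons, hb]
      simp only [Bool.not_false, Bool.true_and]
      unfold pvF
      rw [pvIdxs_cons, pvIdxs_cons]
      simp only [hb, Bool.not_false, Bool.false_eq_true, reduceIte,
        List.cons_append, List.nil_append]
      rcases hJ : pvIdxs pvIsImport r (k + 1) with _ | ⟨j, J'⟩
      · have := (pvIdxs_nil_iff pvIsImport r (k + 1)).1 hJ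
        simp [pvMax?_nil, this]
      · have hall : r.all (fun s => !pvIsImport s) = false := by
          by_contra hc
          have := (pvIdxs_nil_iff pvIsImport r (k + 1)).2 (by simpa using hc)
          simp [this] at hJ
        have hj : k + 1 ≤ j := by
          apply pvIdxs_lb pvIsImport r (k + 1); simp [hJ]
        have hjM := (PySem.List.le_foldl_max J' j).1
        have hminO : ∀ y ∈ pvIdxs (fun s => !pvIsImport s) r (k + 1), k ≤ y := by
          intro y hy
          have := pvIdxs_lb (fun s => !pvIsImport s) r (k + 1) y hy
          omega
        have hmn : (pvIdxs (fun s => !pvIsImport s) r (k + 1)).foldl min k = k :=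
          pvFoldlMin_eq k _ hminO
        simp only [PySem.List.max?_id_cons, PySem.List.min?_id_cons, hmn, hall]
        exact decide_eq_false (by omega)

-- ===== VERDICT (by name: the statement is the Claim_ definition above) =====
theorem check_imports_at_top_py_spec : Claim_equal_check_imports_at_top_py := by
  intro content _
  unfold Spec_check_imports_at_top_py
  rw [check_imports_at_top_py, pvGoA_eq_goS, pvGoS_false,
    ← pvF_eq ((((PySem.Str.split? content "\n").getD []).map PySem.Str.strip).filter pvSignificant) 0]
  rfl
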